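-- pv_equiv track=rewrite | github.com/keepinmind2054/evoclaw | skills_engine/structured.py | merge_npm_dependencies
-- ===== SOURCE A (Python) =====
-- def compare_semver_range(a: str, b: str) -> bool:
--     """Check if two semver range strings are compatible (both point to same major)."""
--     def _major(s: str) -> str:
--         s = s.lstrip("^~>=<")
--         return s.split(".")[0] if s else "0"
--     return _major(a) == _major(b)
--
-- def are_ranges_compatible(range_a: str, range_b: str) -> bool:
--     """Return True if two npm version ranges are compatible."""
--     return compare_semver_range(range_a, range_b)
--
-- def merge_npm_dependencies(
--     base: dict[str, str],
--     incoming: dict[str, str],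
-- ) -> tuple[dict[str, str], list[str]]:
--     """
--     Merge two sets of npm dependencies.
--     Returns (merged, conflicts) where conflicts is a list of warning strings.
--     """
--     merged = dict(base)
--     conflicts = []
--
--     for pkg, version in incoming.items():
--         if pkg in merged:
--             if merged[pkg] != version and not are_ranges_compatible(merged[pkg], version):
--                 conflicts.append(
--                     f"npm dep conflict: {pkg} {merged[pkg]} vs {version} — keeping existing"
--                 )
--         else:
--             merged[pkg] = version
--
--     return merged, conflicts
-- ===== SOURCE B (Python) =====
-- def compare_semver_range(a: str, b: str) -> bool:
--     """Check if two semver range strings are compatible (both point to same major)."""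
--     def _major(s: str) -> str:
--         s = s.lstrip("^~>=<")
--         return s.split(".")[0] if s else "0"
--     return _major(a) == _major(b)
--
-- def are_ranges_compatible(range_a: str, range_b: str) -> bool:
--     """Return True if two npm version ranges are compatible."""
--     return compare_semver_range(range_a, range_b)
--
-- def merge_npm_dependencies(
--     base: dict[str, str],
--     incoming: dict[str, str],
-- ) -> tuple[dict[str, str], list[str]]:
--     """Divide-and-conquer over the incoming items: each half independently yields
--     (extras-to-add, conflicts) against the fixed base, and the halves are combined
--     by concatenation; correct because each item's verdict depends only on base,
--     and concatenation preserves incoming order."""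
--
--     def go(items):
--         if not items:
--             return [], []
--         if len(items) == 1:
--             pkg, version = items[0]
--             if pkg in base:
--                 bv = base[pkg]
--                 if bv != version and not are_ranges_compatible(bv, version):
--                     return [], [
--                         f"npm dep conflict: {pkg} {bv} vs {version} — keeping existing"
--                     ]
--                 return [], []
--             return [(pkg, version)], []
--         mid = len(items) // 2
--         e1, c1 = go(items[:mid])
--         e2, c2 = go(items[mid:])
--         return e1 + e2, c1 + c2
--
--     extras, conflicts = go(list(incoming.items()))
--     merged = dict(base)
--     merged.update(extras)
--     return merged, conflicts
-- ===== Notes on version B (the rewrite author's own statement) =====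
-- stated objective: alternative
-- what changed: Replaces A's sequential stateful loop (mutating merged while scanning incoming) with a divide-and-conquer recursion that splits the incoming items in half, computes (extras, conflicts) for each half independently against the fixed base, and combines halves by concatenation.
import Mathlib
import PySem

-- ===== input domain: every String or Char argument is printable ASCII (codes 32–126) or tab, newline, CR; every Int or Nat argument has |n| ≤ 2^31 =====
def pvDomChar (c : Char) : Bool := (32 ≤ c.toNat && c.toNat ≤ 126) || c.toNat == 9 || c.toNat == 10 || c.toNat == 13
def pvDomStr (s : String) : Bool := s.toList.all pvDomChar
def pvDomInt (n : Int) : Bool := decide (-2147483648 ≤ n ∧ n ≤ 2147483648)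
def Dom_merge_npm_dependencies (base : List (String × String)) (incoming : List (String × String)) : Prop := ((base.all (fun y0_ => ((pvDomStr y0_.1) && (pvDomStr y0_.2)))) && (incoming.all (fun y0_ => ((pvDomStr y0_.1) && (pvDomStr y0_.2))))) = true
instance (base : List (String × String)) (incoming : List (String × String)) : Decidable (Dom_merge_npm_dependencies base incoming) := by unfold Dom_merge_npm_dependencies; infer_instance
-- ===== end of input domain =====

-- B replaces A's sequential stateful loop with a divide-and-conquer recursion over
-- the incoming items, combining half-results by concatenation: alternative structure.

-- ===== PORT A =====
-- shared helpers (identical in Source A and Source B)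
-- s.lstrip("^~>=<") ported by hand: drop leading chars of the set (exact for lstrip with a char set)
def pvMajor (s : String) : String :=
  let t := s.toList.dropWhile (fun c => c == '^' || c == '~' || c == '>' || c == '=' || c == '<')
  if t.isEmpty then "0" else String.ofList ((PySem.Chars.splitOn t ['.']).headD [])

def compare_semver_range (a : String) (b : String) : Bool := pvMajor a == pvMajor b

def are_ranges_compatible (range_a : String) (range_b : String) : Bool :=
  compare_semver_range range_a range_b

-- first-match association-list lookup ('pkg in d' / 'd[pkg]' on a dict's items)
def pvLookup (m : List (String × String)) (k : String) : Option String :=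
  match m with
  | [] => none
  | (k', v) :: rest => if k' == k then some v else pvLookup rest k

def pvMsg (pkg v version : String) : String :=
  "npm dep conflict: " ++ pkg ++ " " ++ v ++ " vs " ++ version ++ " — keeping existing"

-- A's loop: state (merged, conflicts), one step per incoming item
def pvLoopA (merged : List (String × String)) (conflicts : List String) :
    List (String × String) → (List (String × String)) × List String
  | [] => (merged, conflicts)
  | (pkg, version) :: rest =>
    match pvLookup merged pkg with
    | some v =>
      if v != version && !are_ranges_compatible v version then
        pvLoopA merged (conflicts ++ [pvMsg pkg v version]) rest
      else
        pvLoopA merged conflicts rest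
    | none => pvLoopA (merged ++ [(pkg, version)]) conflicts rest

def merge_npm_dependencies (base : List (String × String)) (incoming : List (String × String)) : (List (String × String)) × List String :=
  pvLoopA base [] incoming

-- ===== PORT B =====
-- Source B's 'go': divide-and-conquer on the incoming item list (slices become take/drop;
-- 'items[0]' on the length-1 branch becomes headD, exact there)
def pvGoB (base : List (String × String)) (items : List (String × String)) :
    (List (String × String)) × List String :=
  if items.length = 0 then ([], [])
  else if h1 : items.length = 1 then
    let kv := items.headD ("", "")
    match pvLookup base kv.1 with
    | some bv =>
      if bv != kv.2 && !are_ranges_compatible bv kv.2 then ([], [pvMsg kv.1 bv kv.2])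
      else ([], [])
    | none => ([kv], [])
  else
    let mid := items.length / 2
    let r1 := pvGoB base (items.take mid)
    let r2 := pvGoB base (items.drop mid)
    (r1.1 ++ r2.1, r1.2 ++ r2.2)
termination_by items.length
decreasing_by
  · simp only [List.length_take]; omega
  · simp only [List.length_drop]; omega

def merge_npm_dependencies_alt (base : List (String × String)) (incoming : List (String × String)) : (List (String × String)) × List String :=
  let r := pvGoB base incoming
  (base ++ r.1, r.2)

-- ===== PRECONDITION & SPEC =====
-- Pre_ excludes incoming association lists with duplicate keys: such lists cannot arise from a
-- Python dict argument, and the assoc-list behaviour on them is an artefact of the encoding.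
def Pre_merge_npm_dependencies (base : List (String × String)) (incoming : List (String × String)) : Prop :=
  (incoming.map Prod.fst).Nodup
instance (base : List (String × String)) (incoming : List (String × String)) : Decidable (Pre_merge_npm_dependencies base incoming) := by unfold Pre_merge_npm_dependencies; infer_instance

def pvWitness_merge_npm_dependencies : (List (String × String)) × (List (String × String)) :=
  ([("a", "^1.0.0")], [("a", "^2.0.0"), ("b", "1.0")])

def Spec_merge_npm_dependencies (base : List (String × String)) (incoming : List (String × String)) (out : (List (String × String)) × List String) : Prop := out = merge_npm_dependencies_alt base incoming
instance (base : List (String × String)) (incoming : List (String × String)) (out : (List (String × String)) × List String) : Decidable (Spec_merge_npm_dependencies base incoming out) := by unfold Spec_merge_npm_dependencies; infer_instance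

-- ===== CLAIM (what is proved, stated in full; the proofs are below) =====
def Claim_equal_merge_npm_dependencies : Prop := ∀ (base : List (String × String)) (incoming : List (String × String)), Dom_merge_npm_dependencies base incoming → Pre_merge_npm_dependencies base incoming → Spec_merge_npm_dependencies base incoming (merge_npm_dependencies base incoming)

-- ===== LEMMAS AND PROOFS =====
-- per-item conflict verdict against the fixed base (proof-only abbreviation)
def pvConf (base : List (String × String)) (kv : String × String) : Option String :=
  match pvLookup base kv.1 with
  | some v => if v != kv.2 && !are_ranges_compatible v kv.2 then some (pvMsg kv.1 v kv.2) else none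
  | none => none

theorem pvLookup_append (a b : List (String × String)) (k : String) :
    pvLookup (a ++ b) k = ((pvLookup a k).or (pvLookup b k)) := by
  induction a with
  | nil => simp [pvLookup]
  | cons hd tl ih =>
    obtain ⟨k', v⟩ := hd
    simp only [List.cons_append, pvLookup]
    by_cases h : k' == k <;> simp [h, ih]

-- B's recursion computes the two independent passes over base
theorem pvGoB_eq (base : List (String × String)) :
    ∀ (n : ℕ) (items : List (String × String)), items.length ≤ n →
      pvGoB base items =
        (items.filter (fun kv => (pvLookup base kv.1).isNone), items.filterMap (pvConf base)) := by
  intro n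
  induction n with
  | zero =>
    intro items h
    have : items = [] := List.eq_nil_of_length_eq_zero (Nat.le_zero.mp h)
    subst this; simp [pvGoB]
  | succ n ih =>
    intro items h
    by_cases h0 : items.length = 0
    · have : items = [] := List.eq_nil_of_length_eq_zero h0
      subst this; simp [pvGoB]
    · by_cases h1 : items.length = 1
      · obtain ⟨kv, rest⟩ : ∃ kv rest, items = kv :: rest := by
          cases items with
          | nil => simp at h0
          | cons a b => exact ⟨a, b, rfl⟩
        obtain ⟨rest, rfl⟩ := rest
        have : rest = [] := by
          simp only [List.length_cons] at h1
          exact List.eq_nil_of_length_eq_zero (by omega)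
        subst this
        rw [pvGoB]
        simp only [List.length_cons, List.length_nil, List.headD_cons, pvConf,
          List.filter, List.filterMap]
        norm_num
        cases hb : pvLookup base kv.1 with
        | some v =>
          by_cases hc : ¬v = kv.2 ∧ are_ranges_compatible v kv.2 = false <;> simp [hc]
        | none => simp
      · have h2 : 2 ≤ items.length := by omega
        rw [pvGoB]
        simp only [h0, h1, if_false]
        rw [ih (items.take (items.length / 2)) (by simp [List.length_take]; omega),
            ih (items.drop (items.length / 2)) (by simp [List.length_drop]; omega)]
        rw [← List.filter_append, ← List.filterMap_append,
          List.take_append_drop]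
        simp

-- invariant of A's loop: with an extension ext of base whose keys avoid the remaining
-- incoming keys, the loop computes the two independent passes over base
theorem pvLoopA_invariant (base : List (String × String)) :
    ∀ (inc ext : List (String × String)) (cf : List String),
      (∀ p ∈ inc, pvLookup ext p.1 = none) →
      (inc.map Prod.fst).Nodup →
      pvLoopA (base ++ ext) cf inc =
        (base ++ ext ++ inc.filter (fun kv => (pvLookup base kv.1).isNone),
         cf ++ inc.filterMap (pvConf base)) := by
  intro inc
  induction inc with
  | nil => intro ext cf _ _; simp [pvLoopA]
  | cons hd tl ih =>
    intro ext cf hext hnd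
    obtain ⟨pkg, version⟩ := hd
    have hhd : pvLookup ext pkg = none := hext (pkg, version) (List.mem_cons_self ..)
    have htl : ∀ p ∈ tl, pvLookup ext p.1 = none := fun p hp => hext p (List.mem_cons_of_mem _ hp)
    have hndtl : (tl.map Prod.fst).Nodup := (List.nodup_cons.mp hnd).2
    have hne : ∀ p ∈ tl, p.1 ≠ pkg := by
      intro p hp heq
      exact (List.nodup_cons.mp hnd).1 (List.mem_map.mpr ⟨p, hp, heq⟩)
    simp only [pvLoopA, pvLookup_append, hhd]
    cases hb : pvLookup base pkg with
    | some v =>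
      simp only [Option.or, List.filter_cons, hb, Option.isNone_some,
        Bool.false_eq_true, if_false, List.filterMap_cons, pvConf]
      by_cases hc : (v != version && !are_ranges_compatible v version) = true
      · rw [if_pos hc, ih ext (cf ++ [pvMsg pkg v version]) htl hndtl]
        simp [hc, pvConf, hb]
      · rw [if_neg hc, ih ext cf htl hndtl]
        simp [hc, pvConf, hb]
    | none =>
      simp only [Option.or, List.filter_cons, hb, Option.isNone_none, if_true,
        List.filterMap_cons, pvConf]
      have hassoc : base ++ ext ++ [(pkg, version)] = base ++ (ext ++ [(pkg, version)]) := by simp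
      rw [hassoc, ih (ext ++ [(pkg, version)]) cf
        (by
          intro p hp
          rw [pvLookup_append, htl p hp]
          simp [pvLookup, Option.or, Ne.symm (hne p hp)])
        hndtl]
      simp [pvConf, hb]

-- ===== VERDICT (by name: the statement is the Claim_ definition above) =====
theorem merge_npm_dependencies_spec : Claim_equal_merge_npm_dependencies := by
  intro base incoming _ hpre
  unfold Spec_merge_npm_dependencies merge_npm_dependencies merge_npm_dependencies_alt
  rw [pvGoB_eq base incoming.length incoming le_rfl]
  have h := pvLoopA_invariant base incoming [] [] (by intro p _; rfl) hpre
  simpa using h
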